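-- pv_equiv track=rewrite | github.com/m-nasiruddin/FeatureExtractor | FeatureExtractors_2.0/NovelFeatures/KSkipNGram.py | initial_kskipngrams
-- ===== SOURCE A (Python) =====
-- def initial_kskipngrams(sentence, k, n):
--     if n == 1:
--         return [[sentence[0]]]
--     grams = []
--     for j in range(min(k + 1, len(sentence) - 1)):
--         kmjskipnm1grams = initial_kskipngrams(sentence[j + 1:], k - j, n - 1)
--         if kmjskipnm1grams is not None:
--             for gram in kmjskipnm1grams:
--                 grams.append([sentence[0]] + gram)
--     return grams
-- ===== SOURCE B (Python) =====
-- def initial_kskipngrams(sentence, k, n):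
--     if n == 1:
--         return [[sentence[0]]]
--     if n < 1:
--         return []
--     # A gram is determined by the increasing index tuple 0 < i1 < ... < i_{n-1};
--     # "at most k total skips" collapses to the single bound i_{n-1} < k + n,
--     # and indices must stay below len(sentence).
--     hi = min(len(sentence), k + n)  # exclusive upper bound on usable indices
--
--     def combos(start, r):
--         if r == 0:
--             return [[]]
--         return [[i] + rest
--                 for i in range(start, hi)
--                 for rest in combos(i + 1, r - 1)]
--
--     return [[sentence[0]] + [sentence[i] for i in c] for c in combos(1, n - 1)]
-- ===== Notes on version B (the rewrite author's own statement) =====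
-- stated objective: alternative
-- what changed: Replaces the k-threading recursion (which decrements the remaining skip budget branch by branch) with a combinatorial characterisation: each gram corresponds to an increasing index tuple whose last index is below min(len(sentence), k+n), so B enumerates index combinations with a single bound and builds each gram once by direct indexing.
import Mathlib
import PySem

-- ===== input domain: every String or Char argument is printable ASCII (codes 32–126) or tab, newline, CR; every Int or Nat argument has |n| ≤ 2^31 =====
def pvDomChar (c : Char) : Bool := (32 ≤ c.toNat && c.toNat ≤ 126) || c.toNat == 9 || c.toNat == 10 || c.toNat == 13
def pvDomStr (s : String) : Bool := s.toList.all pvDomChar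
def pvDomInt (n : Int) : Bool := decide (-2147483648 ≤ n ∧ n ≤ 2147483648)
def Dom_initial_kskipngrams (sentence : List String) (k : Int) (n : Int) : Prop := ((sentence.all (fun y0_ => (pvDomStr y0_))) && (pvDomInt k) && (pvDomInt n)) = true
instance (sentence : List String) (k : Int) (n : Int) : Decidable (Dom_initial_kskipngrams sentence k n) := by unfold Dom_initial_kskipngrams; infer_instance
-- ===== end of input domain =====

-- B replaces the k-threading recursion by enumerating the increasing index tuples of
-- each gram under the single bound min(len(sentence), k+n); return values proved equal
-- wherever A returns (A raises IndexError only for n == 1 with an empty sentence).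

-- ===== PORT A =====
-- literal transliteration of Source A; A's `is not None` guard is always true, and the
-- append loop over `kmjskipnm1grams` is the foldl-append below.
def initial_kskipngrams (sentence : List String) (k : Int) (n : Int) : List (List String) :=
  if n = 1 then
    [[(PySem.List.pyGet? sentence 0).getD ""]]  -- sentence[0]; none = IndexError, excluded by Pre_
  else
    (PySem.List.pyRange 0 (min (k + 1) ((sentence.length : Int) - 1)) 1).attach.foldl
      (fun grams jh =>
        grams ++ (initial_kskipngrams (PySem.List.slice sentence (some (jh.1 + 1)) none) (k - jh.1) (n - 1)).map
          (fun gram => (PySem.List.pyGet? sentence 0).getD "" :: gram)) []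
termination_by sentence.length
decreasing_by
  have h := (PySem.List.mem_pyRange_one.mp jh.2)
  rw [PySem.List.slice_from sentence (show (0:Int) ≤ jh.1 + 1 by omega)]
  simp only [List.length_drop]
  omega

-- ===== PORT B =====
-- `combos` helper of Source B; its parameter r is a Python int that Source B only ever calls
-- with r ≥ 0, ported as a Nat (the call site passes (n-1).toNat with n ≥ 2)
def pvCombos (hi : Int) (start : Int) : Nat → List (List Int)
  | 0 => [[]]
  | r + 1 => (PySem.List.pyRange start hi 1).flatMap
      (fun i => (pvCombos hi (i + 1) r).map (fun rest => i :: rest))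

def initial_kskipngrams_alt (sentence : List String) (k : Int) (n : Int) : List (List String) :=
  if n = 1 then
    [[(PySem.List.pyGet? sentence 0).getD ""]]  -- sentence[0]; none = IndexError, excluded by Pre_
  else if n < 1 then []
  else
    (pvCombos (min ((sentence.length : Int)) (k + n)) 1 (n - 1).toNat).map
      (fun c => (PySem.List.pyGet? sentence 0).getD "" ::
        c.map (fun i => (PySem.List.pyGet? sentence i).getD ""))

-- ===== PRECONDITION & SPEC =====
-- A raises IndexError exactly when n == 1 and the sentence is empty; nothing else is excluded.
def Pre_initial_kskipngrams (sentence : List String) (k : Int) (n : Int) : Prop :=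
  ¬ (n = 1 ∧ sentence = [])
instance (sentence : List String) (k : Int) (n : Int) : Decidable (Pre_initial_kskipngrams sentence k n) := by
  unfold Pre_initial_kskipngrams; infer_instance

def pvWitness_initial_kskipngrams : List String × Int × Int := (["a", "b", "c", "d"], 1, 2)

def Spec_initial_kskipngrams (sentence : List String) (k : Int) (n : Int) (out : List (List String)) : Prop := out = initial_kskipngrams_alt sentence k n
instance (sentence : List String) (k : Int) (n : Int) (out : List (List String)) : Decidable (Spec_initial_kskipngrams sentence k n out) := by unfold Spec_initial_kskipngrams; infer_instance

-- ===== CLAIM (what is proved, stated in full; the proofs are below) =====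
def Claim_equal_initial_kskipngrams : Prop := ∀ (sentence : List String) (k : Int) (n : Int), Dom_initial_kskipngrams sentence k n → Pre_initial_kskipngrams sentence k n → Spec_initial_kskipngrams sentence k n (initial_kskipngrams sentence k n)

-- ===== LEMMAS AND PROOFS =====

-- unfolding of port A's else-branch as a flatMap
theorem initA_unfold (sentence : List String) (k n : Int) (hn : n ≠ 1) :
    initial_kskipngrams sentence k n =
      (PySem.List.pyRange 0 (min (k + 1) ((sentence.length : Int) - 1)) 1).flatMap
        (fun j => (initial_kskipngrams (PySem.List.slice sentence (some (j + 1)) none) (k - j) (n - 1)).map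
          (fun gram => (PySem.List.pyGet? sentence 0).getD "" :: gram)) := by
  rw [initial_kskipngrams, if_neg hn]
  rw [List.foldl_attach
    (f := fun grams j => grams ++ (initial_kskipngrams (PySem.List.slice sentence (some (j + 1)) none) (k - j) (n - 1)).map
          (fun gram => (PySem.List.pyGet? sentence 0).getD "" :: gram))
    (b := [])]
  rw [PySem.List.foldl_append_eq_flatMap]
  simp

-- combos with fewer available values than needed is empty
theorem pvCombos_nil (r : Nat) (hr : 1 ≤ r) (hi start : Int) (h : hi < start + r) :
    pvCombos hi start r = [] := by
  induction r generalizing start with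
  | zero => omega
  | succ r IH =>
    rw [pvCombos]
    rw [List.flatMap_eq_nil_iff]
    intro i hi'
    have hm := PySem.List.mem_pyRange_one.mp hi'
    rcases Nat.eq_zero_or_pos r with h0 | h1
    · subst h0; omega
    · rw [IH h1 (i + 1) (by push_cast at h ⊢; omega)]
      simp

-- every element of every combo is ≥ start
theorem pvCombos_mem_ge (r : Nat) (hi start : Int) (c : List Int) (hc : c ∈ pvCombos hi start r)
    (x : Int) (hx : x ∈ c) : start ≤ x := by
  induction r generalizing start c with
  | zero => simp [pvCombos] at hc; subst hc; simp at hx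
  | succ r IH =>
    rw [pvCombos, List.mem_flatMap] at hc
    obtain ⟨i, hi', hc⟩ := hc
    obtain ⟨rest, hrest, rfl⟩ := List.mem_map.mp hc
    have hm := PySem.List.mem_pyRange_one.mp hi'
    rcases List.mem_cons.mp hx with rfl | hx
    · omega
    · have := IH (i + 1) rest hrest hx
      omega

-- shifting both bounds and the start shifts every produced index
theorem pvCombos_shift (d : Int) (r : Nat) (hi start : Int) :
    pvCombos hi start r = (pvCombos (hi - d) (start - d) r).map (List.map (· + d)) := by
  induction r generalizing start with
  | zero => simp [pvCombos]
  | succ r IH =>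
    rw [pvCombos, pvCombos]
    rw [List.map_flatMap]
    have hrange : PySem.List.pyRange start hi 1
        = (PySem.List.pyRange (start - d) (hi - d) 1).map (· + d) := by
      rw [PySem.List.pyRange_one, PySem.List.pyRange_one, List.map_map]
      have : hi - d - (start - d) = hi - start := by ring
      rw [this]
      apply List.map_congr_left
      intro a _
      simp; ring
    rw [hrange, List.flatMap_map]
    apply List.flatMap_congr
    intro i _
    have h2 : i + d + 1 - d = i + 1 := by ring
    rw [IH (i + d + 1), h2, List.map_map, List.map_map]
    apply List.map_congr_left
    intro c _
    simp

-- A returns [] whenever n ≤ 0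
theorem initA_nonpos (s : List String) (k n : Int) (hn : n ≤ 0) :
    initial_kskipngrams s k n = [] := by
  suffices H : ∀ (L : Nat) (s : List String) (k n : Int), s.length ≤ L → n ≤ 0 →
      initial_kskipngrams s k n = [] by exact H s.length s k n le_rfl hn
  intro L
  induction L with
  | zero =>
    intro s k n hL hn
    rw [initA_unfold s k n (by omega)]
    have hs : s.length = 0 := by omega
    rw [PySem.List.pyRange_one_eq_nil (by rw [hs]; omega)]
    simp
  | succ L IH =>
    intro s k n hL hn
    rw [initA_unfold s k n (by omega)]
    rw [List.flatMap_eq_nil_iff]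
    intro j hj
    have hm := PySem.List.mem_pyRange_one.mp hj
    rw [PySem.List.slice_from s (show (0:Int) ≤ j + 1 by omega)]
    rw [IH _ (k - j) (n - 1) (by simp [List.length_drop]; omega) (by omega)]
    simp

-- equivalence on the empty sentence (for n ≠ 1)
theorem initA_eq_alt_nil (k n : Int) (hn : n ≠ 1) :
    initial_kskipngrams [] k n = initial_kskipngrams_alt [] k n := by
  by_cases hn0 : n < 1
  · rw [initA_nonpos [] k n (by omega)]
    rw [initial_kskipngrams_alt, if_neg hn, if_pos hn0]
  · have hn2 : 2 ≤ n := by omega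
    rw [initA_unfold [] k n hn]
    rw [initial_kskipngrams_alt, if_neg hn, if_neg hn0]
    rw [PySem.List.pyRange_one_eq_nil (by simp)]
    rw [pvCombos_nil (n - 1).toNat (by omega) _ 1 (by simp; omega)]
    simp

-- the main equivalence
theorem initA_eq_alt (s : List String) (k n : Int) (h : ¬ (n = 1 ∧ s = [])) :
    initial_kskipngrams s k n = initial_kskipngrams_alt s k n := by
  suffices H : ∀ (L : Nat) (s : List String) (k n : Int), s.length ≤ L → ¬ (n = 1 ∧ s = []) →
      initial_kskipngrams s k n = initial_kskipngrams_alt s k n from H s.length s k n le_rfl h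
  intro L
  induction L with
  | zero =>
    intro s k n hL hpre
    have hs : s = [] := by cases s <;> simp_all
    subst hs
    exact initA_eq_alt_nil k n (by tauto)
  | succ L IH =>
    intro s k n hL hpre
    by_cases hn1 : n = 1
    · rw [initial_kskipngrams, initial_kskipngrams_alt, if_pos hn1, if_pos hn1]
    by_cases hn0 : n < 1
    · rw [initA_nonpos s k n (by omega)]
      rw [initial_kskipngrams_alt, if_neg hn1, if_pos hn0]
    have hn2 : 2 ≤ n := by omega
    by_cases hs : s = []
    · subst hs; exact initA_eq_alt_nil k n hn1
    have hlen : 1 ≤ s.length := by cases s <;> simp_all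
    have hr : (n - 1).toNat = (n - 2).toNat + 1 := by omega
    rw [initA_unfold s k n hn1]
    rw [initial_kskipngrams_alt, if_neg hn1, if_neg hn0]
    rw [hr, pvCombos, List.map_flatMap]
    set m := min (k + 1) ((s.length : Int) - 1) with hm_def
    set hi := min ((s.length : Int)) (k + n) with hhi_def
    set r := (n - 2).toNat with hr_def
    have hrInt : (r : Int) = n - 2 := by omega
    by_cases hkneg : k + 1 ≤ 0
    · rw [PySem.List.pyRange_one_eq_nil (show m ≤ 0 by omega)]
      rw [List.flatMap_nil]
      symm
      rw [List.flatMap_eq_nil_iff]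
      intro i hii
      have hb := PySem.List.mem_pyRange_one.mp hii
      rcases Nat.eq_zero_or_pos r with hr0 | hr1
      · exfalso; omega
      · rw [pvCombos_nil r hr1 hi (i + 1) (by omega)]
        simp
    -- 0 ≤ k
    rw [PySem.List.pyRange_one_append 1 (m + 1) hi (by omega) (by omega),
        List.flatMap_append]
    have hdead : (PySem.List.pyRange (m + 1) hi 1).flatMap
        (fun i => ((pvCombos hi (i + 1) r).map (fun rest => i :: rest)).map
          (fun c => (PySem.List.pyGet? s 0).getD "" ::
            c.map (fun i => (PySem.List.pyGet? s i).getD ""))) = [] := by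
      rw [List.flatMap_eq_nil_iff]
      intro i hii
      have hb := PySem.List.mem_pyRange_one.mp hii
      rcases Nat.eq_zero_or_pos r with hr0 | hr1
      · exfalso; omega
      · rw [pvCombos_nil r hr1 hi (i + 1) (by omega)]
        simp
    rw [hdead, List.append_nil]
    have hreidx : PySem.List.pyRange 1 (m + 1) 1 = (PySem.List.pyRange 0 m 1).map (· + 1) := by
      rw [PySem.List.pyRange_one, PySem.List.pyRange_one, List.map_map]
      have he : m + 1 - 1 = m - 0 := by ring
      rw [he]
      apply List.map_congr_left
      intro a _
      simp [add_comm]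
    rw [hreidx, List.flatMap_map]
    apply List.flatMap_congr
    intro j hj
    have hjb := PySem.List.mem_pyRange_one.mp hj
    rw [PySem.List.slice_from s (show (0:Int) ≤ j + 1 by omega)]
    have hget : ∀ (x : Int), 0 ≤ x →
        PySem.List.pyGet? (s.drop (j + 1).toNat) x = PySem.List.pyGet? s (x + (j + 1)) := by
      intro x hx
      rw [PySem.List.pyGet?_of_nonneg _ hx, PySem.List.pyGet?_of_nonneg _ (by omega),
          List.getElem?_drop]
      congr 1
      omega
    rw [List.map_map]
    rcases Nat.eq_zero_or_pos r with hr0 | hr1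
    · -- n = 2: the recursive call hits the base case
      rw [hr0]
      rw [initial_kskipngrams, if_pos (show n - 1 = 1 by omega)]
      show _ = List.map _ (pvCombos hi (j + 1 + 1) 0)
      rw [pvCombos]
      simp only [List.map_cons, List.map_nil]
      rw [hget 0 le_rfl]
      norm_num
    · -- 3 ≤ n: recursive call via IH, then shift the combinations
      rw [IH (s.drop (j + 1).toNat) (k - j) (n - 1)
          (by simp [List.length_drop]; omega) (by intro hc; omega)]
      rw [initial_kskipngrams_alt, if_neg (by omega), if_neg (by omega)]
      have hlen' : (((s.drop (j + 1).toNat).length : Nat) : Int) = (s.length : Int) - (j + 1) := by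
        simp [List.length_drop]; omega
      have hhi' : min (((s.drop (j + 1).toNat).length : Nat) : Int) ((k - j) + (n - 1)) = hi - (j + 1) := by
        rw [hlen']; omega
      rw [hhi']
      have hrr : (n - 1 - 1).toNat = r := by omega
      rw [hrr]
      rw [pvCombos_shift (j + 1) r hi (j + 1 + 1)]
      have h1 : j + 1 + 1 - (j + 1) = (1 : Int) := by ring
      rw [h1]
      simp only [List.map_map]
      apply List.map_congr_left
      intro c hc
      rw [hget 0 le_rfl]
      norm_num
      intro x hx
      have hx1 := pvCombos_mem_ge r (hi - (j + 1)) 1 c hc x hx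
      rw [hget x (by omega)]

-- ===== VERDICT (by name: the statement is the Claim_ definition above) =====
theorem initial_kskipngrams_spec : Claim_equal_initial_kskipngrams := by
  intro s k n _ hpre
  unfold Spec_initial_kskipngrams
  exact initA_eq_alt s k n hpre
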